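-- pv_equiv track=rewrite | github.com/godinenbicicleta/AoC | 2020/day10.py | to_chunks
-- ===== SOURCE A (Python) =====
-- def to_chunks(data):
--     chunks = []
--     current_chunk = []
--     for i in range(len(data)):
--         if not current_chunk:
--             current_chunk.append(data[i])
--
--         elif data[i] - current_chunk[-1] <= 3:
--             current_chunk.append(data[i])
--         else:
--             chunks.append(current_chunk)
--             current_chunk = [data[i]]
--     if current_chunk:
--         chunks.append(current_chunk)
--     return chunks
-- ===== SOURCE B (Python) =====
-- def to_chunks(data):
--     if not data:
--         return []
--     n = len(data)
--     cuts = [i for i in range(1, n) if data[i] - data[i - 1] > 3]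
--     chunks = []
--     prev = 0
--     for c in cuts + [n]:
--         chunks.append(data[prev:c])
--         prev = c
--     return chunks
-- ===== Notes on version B (the rewrite author's own statement) =====
-- stated objective: alternative
-- what changed: A accumulates a current chunk element by element inside one stateful loop; B first computes the list of cut positions (indices where the consecutive difference exceeds 3) and then emits the chunks as slices between consecutive cut points.
import Mathlib
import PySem

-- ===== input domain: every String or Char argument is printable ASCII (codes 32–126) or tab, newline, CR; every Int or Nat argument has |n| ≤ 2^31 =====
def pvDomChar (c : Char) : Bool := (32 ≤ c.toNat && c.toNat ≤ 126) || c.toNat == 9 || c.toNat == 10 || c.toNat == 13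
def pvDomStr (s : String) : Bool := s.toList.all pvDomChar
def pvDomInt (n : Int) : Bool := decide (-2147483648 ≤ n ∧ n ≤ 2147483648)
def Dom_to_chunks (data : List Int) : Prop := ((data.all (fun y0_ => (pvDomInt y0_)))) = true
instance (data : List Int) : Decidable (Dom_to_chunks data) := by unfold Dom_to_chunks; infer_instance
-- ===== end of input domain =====

-- B replaces A's element-by-element accumulation of a current chunk by a two-phase plan:
-- first collect the cut positions (indices whose consecutive difference exceeds 3), then emit
-- the chunks as slices between consecutive cut points (objective: alternative decomposition).

-- ===== PORT A =====
def to_chunks (data : List Int) : List (List Int) :=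
  let p := (PySem.List.pyRange 0 (PySem.List.len data) 1).foldl
    (fun (st : List (List Int) × List Int) i =>
      let x := PySem.List.pyGetD data i 0
      if st.2.isEmpty then (st.1, st.2 ++ [x])
      else if x - PySem.List.pyGetD st.2 (-1) 0 ≤ 3 then (st.1, st.2 ++ [x])
      else (st.1 ++ [st.2], [x]))
    ([], [])
  if !p.2.isEmpty then p.1 ++ [p.2] else p.1

-- ===== PORT B =====
def to_chunks_alt (data : List Int) : List (List Int) :=
  if data.isEmpty then []
  else
    let n : Int := PySem.List.len data
    let cuts := (PySem.List.pyRange 1 n 1).filter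
      (fun i => PySem.List.pyGetD data i 0 - PySem.List.pyGetD data (i - 1) 0 > 3)
    let p := (cuts ++ [n]).foldl
      (fun (st : List (List Int) × Int) c =>
        (st.1 ++ [PySem.List.slice data (some st.2) (some c)], c))
      ([], 0)
    p.1

-- ===== PRECONDITION & SPEC =====
def Spec_to_chunks (data : List Int) (out : List (List Int)) : Prop := out = to_chunks_alt data
instance (data : List Int) (out : List (List Int)) : Decidable (Spec_to_chunks data out) := by unfold Spec_to_chunks; infer_instance

-- ===== CLAIM (what is proved, stated in full; the proofs are below) =====
def Claim_equal_to_chunks : Prop := ∀ (data : List Int), Dom_to_chunks data → Spec_to_chunks data (to_chunks data)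

-- ===== LEMMAS AND PROOFS =====

/-- Reference recursion both ports are reduced to: finish the current nonempty
chunk `c` against the remaining elements, splitting where the difference exceeds 3. -/
def glue : List Int → List Int → List (List Int)
  | c, [] => [c]
  | c, x :: xs =>
    if x - PySem.List.pyGetD c (-1) 0 ≤ 3 then glue (c ++ [x]) xs else c :: glue [x] xs

theorem pyGetD_singleton_neg_one (l : Int) : PySem.List.pyGetD [l] (-1) 0 = l :=
  PySem.List.pyGetD_neg_one_append_singleton (xs := []) (x := l) (d := 0)

/-- The first chunk of `glue [l] xs` starts at `l`; prefixing the seed chunk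
only prefixes that first chunk. -/
theorem glue_split (xs : List Int) : ∀ (l : Int) (c : List Int),
    ∃ h t, glue [l] xs = h :: t ∧ glue (c ++ [l]) xs = (c ++ h) :: t := by
  induction xs with
  | nil => intro l c; exact ⟨[l], [], rfl, rfl⟩
  | cons x xs ih =>
    intro l c
    by_cases hc : x - l ≤ 3
    · obtain ⟨h, t, e1, e2⟩ := ih x [l]
      obtain ⟨h', t', e1', e2'⟩ := ih x (c ++ [l])
      rw [e1] at e1'
      injection e1' with hh ht
      subst hh; subst ht
      refine ⟨l :: h, t, ?_, ?_⟩
      · show (if x - PySem.List.pyGetD [l] (-1) 0 ≤ 3 then glue ([l] ++ [x]) xs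
            else [l] :: glue [x] xs) = (l :: h) :: t
        rw [pyGetD_singleton_neg_one, if_pos hc, e2]
        simp
      · show (if x - PySem.List.pyGetD (c ++ [l]) (-1) 0 ≤ 3 then glue ((c ++ [l]) ++ [x]) xs
            else (c ++ [l]) :: glue [x] xs) = (c ++ (l :: h)) :: t
        rw [PySem.List.pyGetD_neg_one_append_singleton, if_pos hc, e2']
        simp
    · refine ⟨[l], glue [x] xs, ?_, ?_⟩
      · show (if x - PySem.List.pyGetD [l] (-1) 0 ≤ 3 then glue ([l] ++ [x]) xs
            else [l] :: glue [x] xs) = [l] :: glue [x] xs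
        rw [pyGetD_singleton_neg_one, if_neg hc]
      · show (if x - PySem.List.pyGetD (c ++ [l]) (-1) 0 ≤ 3 then glue ((c ++ [l]) ++ [x]) xs
            else (c ++ [l]) :: glue [x] xs) = (c ++ [l]) :: glue [x] xs
        rw [PySem.List.pyGetD_neg_one_append_singleton, if_neg hc]

/-- A's loop body, once the index loop is replaced by the element loop. -/
def stepA (st : List (List Int) × List Int) (x : Int) : List (List Int) × List Int :=
  if st.2.isEmpty then (st.1, st.2 ++ [x])
  else if x - PySem.List.pyGetD st.2 (-1) 0 ≤ 3 then (st.1, st.2 ++ [x])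
  else (st.1 ++ [st.2], [x])

theorem loopA (xs : List Int) : ∀ (chunks : List (List Int)) (cur : List Int), cur ≠ [] →
    (if !(xs.foldl stepA (chunks, cur)).2.isEmpty
      then (xs.foldl stepA (chunks, cur)).1 ++ [(xs.foldl stepA (chunks, cur)).2]
      else (xs.foldl stepA (chunks, cur)).1) = chunks ++ glue cur xs := by
  induction xs with
  | nil =>
    intro chunks cur hcur
    simp only [List.foldl_nil, glue]
    rw [if_pos]
    simp [hcur]
  | cons x xs ih =>
    intro chunks cur hcur
    simp only [List.foldl_cons]
    have hne : cur.isEmpty = false := by simp [hcur]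
    by_cases hc : x - PySem.List.pyGetD cur (-1) 0 ≤ 3
    · have hst : stepA (chunks, cur) x = (chunks, cur ++ [x]) := by
        simp [stepA, hne, hc]
      rw [hst, ih chunks (cur ++ [x]) (by simp)]
      show chunks ++ glue (cur ++ [x]) xs
          = chunks ++ if x - PySem.List.pyGetD cur (-1) 0 ≤ 3 then glue (cur ++ [x]) xs
            else cur :: glue [x] xs
      rw [if_pos hc]
    · have hst : stepA (chunks, cur) x = (chunks ++ [cur], [x]) := by
        simp [stepA, hne, hc]
      rw [hst, ih (chunks ++ [cur]) [x] (by simp)]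
      show (chunks ++ [cur]) ++ glue [x] xs
          = chunks ++ if x - PySem.List.pyGetD cur (-1) 0 ≤ 3 then glue (cur ++ [x]) xs
            else cur :: glue [x] xs
      rw [if_neg hc]
      simp

/-- Port A, with the index loop replaced by the element loop. -/
theorem to_chunks_eq_foldA (data : List Int) :
    to_chunks data =
      (if !(data.foldl stepA ([], [])).2.isEmpty
        then (data.foldl stepA ([], [])).1 ++ [(data.foldl stepA ([], [])).2]
        else (data.foldl stepA ([], [])).1) := by
  show (if !((PySem.List.pyRange 0 (PySem.List.len data) 1).foldl
        (fun st i => stepA st (PySem.List.pyGetD data i 0)) ([], [])).2.isEmpty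
      then ((PySem.List.pyRange 0 (PySem.List.len data) 1).foldl
        (fun st i => stepA st (PySem.List.pyGetD data i 0)) ([], [])).1
        ++ [((PySem.List.pyRange 0 (PySem.List.len data) 1).foldl
        (fun st i => stepA st (PySem.List.pyGetD data i 0)) ([], [])).2]
      else ((PySem.List.pyRange 0 (PySem.List.len data) 1).foldl
        (fun st i => stepA st (PySem.List.pyGetD data i 0)) ([], [])).1) = _
  rw [PySem.List.foldl_pyRange_zero_pyGetD data 0 stepA ([], [])]

/-- Port A computes the reference recursion. -/
theorem to_chunks_eq_glue (x : Int) (xs : List Int) :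
    to_chunks (x :: xs) = glue [x] xs := by
  rw [to_chunks_eq_foldA]
  simp only [List.foldl_cons]
  have h0 : stepA ([], []) x = ([], [x]) := by simp [stepA]
  rw [h0]
  simpa using loopA xs [] [x] (by simp)

theorem to_chunks_nil : to_chunks [] = [] := by
  rw [to_chunks_eq_foldA]; rfl

-- ===== B-side reduction =====

/-- Chunks as slices between consecutive cut points, carried with a running `prev`. -/
def slicesFrom (data : List Int) : Nat → List Nat → List (List Int)
  | _, [] => []
  | prev, c :: cs => ((data.drop prev).take (c - prev)) :: slicesFrom data c cs

/-- The boundary predicate on (Nat) positions. -/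
def bnd (data : List Int) (k : Nat) : Bool := decide (data.getD (k + 1) 0 - data.getD k 0 > 3)

theorem take_drop_cons (data : List Int) (j c : Nat) (hj : j < data.length) (hc : j < c) :
    (data.drop j).take (c - j) = data.getD j 0 :: (data.drop (j + 1)).take (c - (j + 1)) := by
  rw [List.drop_eq_getElem_cons hj]
  have h1 : c - j = (c - (j + 1)) + 1 := by omega
  rw [h1, List.take_succ_cons, List.getD_eq_getElem data 0 hj]

/-- B's fold over Int cut points is `slicesFrom` on Nat cut points. -/
theorem foldl_slices (data : List Int) (csN : List Nat) :
    ∀ (acc : List (List Int)) (prev : Nat),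
    ((csN.map (fun c : Nat => (c : Int))).foldl
      (fun (st : List (List Int) × Int) c =>
        (st.1 ++ [PySem.List.slice data (some st.2) (some c)], c))
      (acc, ((prev : Nat) : Int))).1 = acc ++ slicesFrom data prev csN := by
  induction csN with
  | nil => intro acc prev; simp [slicesFrom]
  | cons c cs ih =>
    intro acc prev
    simp only [List.map_cons, List.foldl_cons]
    rw [PySem.List.slice_natCast, ih]
    simp [slicesFrom]

/-- Key lemma: slicing at the boundary positions from `j` on computes `glue`
seeded with the element at `j`. -/
theorem slices_glue (data : List Int) : ∀ (m j : Nat), j + m + 1 = data.length →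
    slicesFrom data j (((List.range' j m).filter (bnd data)).map (· + 1) ++ [data.length])
      = glue [data.getD j 0] (data.drop (j + 1)) := by
  intro m
  induction m with
  | zero =>
    intro j hj
    have hjl : j < data.length := by omega
    have hdropnil : data.drop (j + 1) = [] := List.drop_eq_nil_of_le (by omega)
    show ((data.drop j).take (data.length - j)) :: slicesFrom data data.length [] = _
    rw [take_drop_cons data j data.length hjl (by omega), hdropnil]
    simp [glue, slicesFrom]
  | succ m ih =>
    intro j hj
    have hjl : j < data.length := by omega
    have hj1 : j + 1 < data.length := by omega
    have hdrop : data.drop (j + 1) = data.getD (j + 1) 0 :: data.drop (j + 2) := by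
      rw [List.drop_eq_getElem_cons hj1, List.getD_eq_getElem data 0 hj1]
    rw [List.range'_succ]
    by_cases hb : bnd data j = true
    · rw [List.filter_cons_of_pos hb]
      show ((data.drop j).take ((j + 1) - j)) ::
          slicesFrom data (j + 1) (((List.range' (j + 1) m).filter (bnd data)).map (· + 1)
            ++ [data.length]) = _
      rw [ih (j + 1) (by omega), take_drop_cons data j (j + 1) hjl (by omega)]
      simp only [Nat.sub_self, List.take_zero]
      conv_rhs => rw [hdrop]
      show _ = (if data.getD (j + 1) 0 - PySem.List.pyGetD [data.getD j 0] (-1) 0 ≤ 3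
          then glue ([data.getD j 0] ++ [data.getD (j + 1) 0]) (data.drop (j + 2))
          else [data.getD j 0] :: glue [data.getD (j + 1) 0] (data.drop (j + 2)))
      have hb' := hb
      unfold bnd at hb'
      rw [decide_eq_true_eq] at hb'
      rw [pyGetD_singleton_neg_one, if_neg (by omega)]
    · rw [List.filter_cons_of_neg hb]
      -- the cut list is unchanged; shift its first slice by one element
      have hmem : ∀ c ∈ ((List.range' (j + 1) m).filter (bnd data)).map (· + 1)
          ++ [data.length], j + 1 ≤ c := by
        intro c hcmem
        rcases List.mem_append.1 hcmem with hin | hin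
        · obtain ⟨k, hk, rfl⟩ := List.mem_map.1 hin
          have := List.mem_range'.1 (List.mem_of_mem_filter hk)
          omega
        · simp only [List.mem_singleton] at hin; omega
      obtain ⟨c, cs, hL⟩ : ∃ c cs,
          ((List.range' (j + 1) m).filter (bnd data)).map (· + 1) ++ [data.length]
            = c :: cs := by
        cases h : ((List.range' (j + 1) m).filter (bnd data)).map (· + 1) ++ [data.length] with
        | nil => simp at h
        | cons c cs => exact ⟨c, cs, rfl⟩
      have hcge : j + 1 ≤ c := hmem c (by rw [hL]; exact List.mem_cons_self ..)
      have hIH := ih (j + 1) (by omega)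
      rw [hL] at hIH ⊢
      have hIH' : ((data.drop (j + 1)).take (c - (j + 1))) :: slicesFrom data c cs
          = glue [data.getD (j + 1) 0] (data.drop (j + 2)) := hIH
      show ((data.drop j).take (c - j)) :: slicesFrom data c cs = _
      rw [take_drop_cons data j c hjl (by omega)]
      conv_rhs => rw [hdrop]
      show _ = (if data.getD (j + 1) 0 - PySem.List.pyGetD [data.getD j 0] (-1) 0 ≤ 3
          then glue ([data.getD j 0] ++ [data.getD (j + 1) 0]) (data.drop (j + 2))
          else [data.getD j 0] :: glue [data.getD (j + 1) 0] (data.drop (j + 2)))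
      have hb' : ¬ (data.getD (j + 1) 0 - data.getD j 0 > 3) := by
        intro hgt
        exact hb (by unfold bnd; rw [decide_eq_true_eq]; exact hgt)
      rw [pyGetD_singleton_neg_one, if_pos (by omega)]
      obtain ⟨h, t, e1, e2⟩ := glue_split (data.drop (j + 2)) (data.getD (j + 1) 0)
        [data.getD j 0]
      rw [e1] at hIH'
      rw [e2]
      injection hIH' with h1 h2
      rw [← h1, ← h2]
      simp

/-- Port B computes the reference recursion. -/
theorem to_chunks_alt_eq_glue (x : Int) (xs : List Int) :
    to_chunks_alt (x :: xs) = glue [x] xs := by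
  set data := x :: xs with hdata
  have hlen : 1 ≤ data.length := by simp [hdata]
  show (if data.isEmpty then [] else
    (((((PySem.List.pyRange 1 (PySem.List.len data) 1).filter
      (fun i => PySem.List.pyGetD data i 0 - PySem.List.pyGetD data (i - 1) 0 > 3))
      ++ [PySem.List.len data]).foldl
      (fun (st : List (List Int) × Int) c =>
        (st.1 ++ [PySem.List.slice data (some st.2) (some c)], c))
      ([], 0)).1)) = glue [x] xs
  rw [if_neg (by simp [hdata])]
  have hrange : PySem.List.pyRange 1 (PySem.List.len data) 1
      = (List.range (data.length - 1)).map (fun k : Nat => ((k + 1 : Nat) : Int)) := by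
    rw [PySem.List.len_eq, PySem.List.pyRange_one]
    have h2 : ((data.length : Int) - 1).toNat = data.length - 1 := by omega
    rw [h2]
    apply List.map_congr_left
    intro k _
    push_cast
    ring
  have hfe : (List.range (data.length - 1)).filter
      ((fun i => decide (PySem.List.pyGetD data i 0 - PySem.List.pyGetD data (i - 1) 0 > 3))
        ∘ (fun k : Nat => ((k + 1 : Nat) : Int)))
      = (List.range (data.length - 1)).filter (bnd data) := by
    apply List.filter_congr
    intro k _
    show decide (PySem.List.pyGetD data ((k + 1 : Nat) : Int) 0
        - PySem.List.pyGetD data (((k + 1 : Nat) : Int) - 1) 0 > 3) = bnd data k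
    have h1 : (((k + 1 : Nat) : Int) - 1) = ((k : Nat) : Int) := by push_cast; ring
    rw [h1, PySem.List.pyGetD_natCast, PySem.List.pyGetD_natCast]
    rfl
  have hcast : ((List.range (data.length - 1)).filter (bnd data)).map
        (fun k : Nat => ((k + 1 : Nat) : Int))
      ++ [PySem.List.len data]
      = (((((List.range (data.length - 1)).filter (bnd data)).map (· + 1))
          ++ [data.length]).map (fun c : Nat => (c : Int))) := by
    rw [PySem.List.len_eq]
    simp [List.map_map, Function.comp]
  rw [hrange, List.filter_map, hfe, hcast]
  have h5 := foldl_slices data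
    ((((List.range (data.length - 1)).filter (bnd data)).map (· + 1)) ++ [data.length]) [] 0
  simp only [Nat.cast_zero, List.nil_append] at h5
  rw [h5]
  have hmain := slices_glue data (data.length - 1) 0 (by omega)
  rw [← List.range_eq_range'] at hmain
  simp only [Nat.zero_add] at hmain
  rw [hmain]
  simp [hdata]

-- ===== VERDICT (by name: the statement is the Claim_ definition above) =====
theorem to_chunks_spec : Claim_equal_to_chunks := by
  intro data _
  unfold Spec_to_chunks
  cases data with
  | nil => rw [to_chunks_nil]; rfl
  | cons x xs => rw [to_chunks_eq_glue, to_chunks_alt_eq_glue]
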